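-- pv_equiv track=rewrite | github.com/victorgalam/git_lern4 | a6.py | secret
-- ===== SOURCE A (Python) =====
-- def secret(s):
--
--      for i in range(0, len(s), 2):
--         if s[i]>='A' and s[i]<='Z':
--              return False
--
--      for i in range(1, len(s), 2):
--         if s[i]<'A' or s[i]>'Z':
--              return False
--
--      return True
-- ===== SOURCE B (Python) =====
-- def secret(s):
--     return all(('A' <= c <= 'Z') == (i % 2 == 1) for i, c in enumerate(s))
-- ===== Notes on version B (the rewrite author's own statement) =====
-- stated objective: simpler
-- what changed: Replaces A's two sequential index-parity loops (even indices scanned for an uppercase letter, then odd indices scanned for a non-uppercase one) with a single pass over enumerate(s) checking that ASCII-uppercase-ness of each character equals the oddness of its index.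
import Mathlib
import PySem

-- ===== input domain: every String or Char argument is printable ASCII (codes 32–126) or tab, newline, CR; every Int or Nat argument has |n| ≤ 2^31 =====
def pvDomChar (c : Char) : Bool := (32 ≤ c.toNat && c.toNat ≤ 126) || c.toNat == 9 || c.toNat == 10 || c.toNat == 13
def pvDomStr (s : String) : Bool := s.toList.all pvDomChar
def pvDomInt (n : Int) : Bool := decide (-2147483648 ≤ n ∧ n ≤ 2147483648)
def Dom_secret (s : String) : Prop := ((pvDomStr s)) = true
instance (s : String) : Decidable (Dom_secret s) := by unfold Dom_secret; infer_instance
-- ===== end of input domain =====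

-- B replaces A's two index-parity loops with one fused pass over enumerate(s); same O(n) cost, simpler.

-- ===== PORT A =====
-- two early-return loops: over range(0, len(s), 2) and range(1, len(s), 2)
def secret (s : String) : Bool :=
  let cs := s.toList
  if (PySem.List.pyRange 0 cs.length 2).any (fun i =>
      let c := PySem.List.pyGetD cs i ' '
      decide ('A' ≤ c) && decide (c ≤ 'Z')) then
    false
  else if (PySem.List.pyRange 1 cs.length 2).any (fun i =>
      let c := PySem.List.pyGetD cs i ' '
      decide (c < 'A') || decide ('Z' < c)) then
    false
  else
    true

-- ===== PORT B =====
-- all(('A' <= c <= 'Z') == (i % 2 == 1) for i, c in enumerate(s))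
def secret_alt (s : String) : Bool :=
  (PySem.List.enumerate s.toList 0).all (fun p =>
    (decide ('A' ≤ p.2) && decide (p.2 ≤ 'Z')) == decide (PySem.Int.mod p.1 2 = 1))

-- ===== PRECONDITION & SPEC =====
def Spec_secret (s : String) (out : Bool) : Prop := out = secret_alt s
instance (s : String) (out : Bool) : Decidable (Spec_secret s out) := by unfold Spec_secret; infer_instance

-- ===== CLAIM (what is proved, stated in full; the proofs are below) =====
def Claim_equal_secret : Prop := ∀ (s : String), Dom_secret s → Spec_secret s (secret s)

-- ===== LEMMAS AND PROOFS =====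

-- the common characterisation: every character is ASCII-uppercase exactly when its index is odd
def UpperOdd (cs : List Char) : Prop :=
  ∀ (k : Nat) (h : k < cs.length), (('A' ≤ cs[k] ∧ cs[k] ≤ 'Z') ↔ k % 2 = 1)

lemma secret_iff (s : String) : secret s = true ↔ UpperOdd s.toList := by
  unfold secret UpperOdd
  dsimp only
  split_ifs with h1 h2
  · simp only [false_iff]
    intro hP
    rw [List.any_eq_true] at h1
    obtain ⟨i, hmem, hup⟩ := h1
    rw [PySem.List.mem_pyRange_iff_of_pos (by norm_num)] at hmem
    obtain ⟨h0, hlt, hdvd⟩ := hmem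
    have hk : i.toNat < s.toList.length := by omega
    have hg : PySem.List.pyGetD s.toList i ' ' = s.toList[i.toNat] :=
      PySem.List.pyGetD_eq_getElem _ _ h0 (by exact_mod_cast hlt)
    simp only [hg, Bool.and_eq_true, decide_eq_true_eq] at hup
    have := (hP i.toNat hk).mp hup
    omega
  · simp only [false_iff]
    intro hP
    rw [List.any_eq_true] at h2
    obtain ⟨i, hmem, hlo⟩ := h2
    rw [PySem.List.mem_pyRange_iff_of_pos (by norm_num)] at hmem
    obtain ⟨h0, hlt, hdvd⟩ := hmem
    have hk : i.toNat < s.toList.length := by omega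
    have hg : PySem.List.pyGetD s.toList i ' ' = s.toList[i.toNat] :=
      PySem.List.pyGetD_eq_getElem _ _ (by omega) (by exact_mod_cast hlt)
    simp only [hg, Bool.or_eq_true, decide_eq_true_eq] at hlo
    have hodd : i.toNat % 2 = 1 := by omega
    have := (hP i.toNat hk).mpr hodd
    rcases hlo with h | h
    · exact absurd this.1 (not_le.mpr h)
    · exact absurd this.2 (not_le.mpr h)
  · simp only [true_iff]
    intro k hk
    constructor
    · intro hup
      by_contra hpar
      apply h1
      rw [List.any_eq_true]
      refine ⟨(k : Int), ?_, ?_⟩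
      · rw [PySem.List.mem_pyRange_iff_of_pos (by norm_num)]
        refine ⟨by omega, by exact_mod_cast hk, by omega⟩
      · have hg : PySem.List.pyGetD s.toList (k : Int) ' ' = s.toList[k] := by
          rw [PySem.List.pyGetD_eq_getElem _ _ (by omega) (by exact_mod_cast hk)]
          simp
        simp only [hg, Bool.and_eq_true, decide_eq_true_eq]
        exact hup
    · intro hpar
      by_contra hup
      apply h2
      rw [List.any_eq_true]
      refine ⟨(k : Int), ?_, ?_⟩
      · rw [PySem.List.mem_pyRange_iff_of_pos (by norm_num)]
        refine ⟨by omega, by exact_mod_cast hk, by omega⟩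
      · have hg : PySem.List.pyGetD s.toList (k : Int) ' ' = s.toList[k] := by
          rw [PySem.List.pyGetD_eq_getElem _ _ (by omega) (by exact_mod_cast hk)]
          simp
        simp only [hg, Bool.or_eq_true, decide_eq_true_eq]
        rcases not_and_or.mp hup with h | h
        · exact Or.inl (not_le.mp h)
        · exact Or.inr (not_le.mp h)

lemma secret_alt_iff (s : String) : secret_alt s = true ↔ UpperOdd s.toList := by
  unfold secret_alt UpperOdd
  rw [List.all_eq_true]
  constructor
  · intro hall k hk
    have hmem : ((0 : Int) + k, s.toList[k]) ∈ PySem.List.enumerate s.toList 0 :=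
      (PySem.List.mem_enumerate_iff _ _ _).mpr ⟨k, hk, rfl⟩
    have := hall _ hmem
    simp only [beq_iff_eq] at this
    rw [Bool.eq_iff_iff] at this
    simp only [Bool.and_eq_true, decide_eq_true_eq] at this
    rw [this]
    have : PySem.Int.mod ((0 : Int) + k) 2 = ((0 : Int) + k) % 2 :=
      PySem.Int.mod_eq_emod_of_pos (by norm_num)
    rw [this]
    omega
  · intro hP p hmem
    rw [PySem.List.mem_enumerate_iff] at hmem
    obtain ⟨k, hk, rfl⟩ := hmem
    have hPk := hP k hk
    simp only [beq_iff_eq]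
    rw [Bool.eq_iff_iff]
    simp only [Bool.and_eq_true, decide_eq_true_eq]
    have hm : PySem.Int.mod ((0 : Int) + k) 2 = ((0 : Int) + k) % 2 :=
      PySem.Int.mod_eq_emod_of_pos (by norm_num)
    rw [hm]
    rw [hPk]
    omega

-- ===== VERDICT (by name: the statement is the Claim_ definition above) =====
theorem secret_spec : Claim_equal_secret := by
  intro s _
  unfold Spec_secret
  rw [Bool.eq_iff_iff, secret_iff, secret_alt_iff]
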